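-- pv_equiv track=rewrite | github.com/wuyuVerse/CRAFT | src/iterative_learning/data/trajectory_extractor.py | _extract_pre_analysis_content
-- ===== SOURCE A (Python) =====
-- def _extract_pre_analysis_content(content: str) -> str:
--     """提取分析前的内容"""
--     markers = [
--         '## Error Analysis',
--         '## Success Analysis',
--         '## Contrast Analysis',
--     ]
--
--     min_pos = len(content)
--     for marker in markers:
--         pos = content.find(marker)
--         if pos != -1 and pos < min_pos:
--             min_pos = pos
--
--     if min_pos < len(content):
--         return content[:min_pos].strip()
--     return content
-- ===== SOURCE B (Python) =====
-- def _extract_pre_analysis_content(content: str) -> str: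
--     """提取分析前的内容"""
--     markers = ('## Error Analysis', '## Success Analysis', '## Contrast Analysis')
--     for i in range(len(content)):
--         if content.startswith(markers, i):
--             return content[:i].strip()
--     return content
-- ===== Notes on version B (the rewrite author's own statement) =====
-- stated objective: alternative
-- what changed: Replaces the three separate content.find passes with min-position tracking by a single left-to-right scan that tests all three markers at once via startswith(tuple, i) and cuts at the first matching index.
import Mathlib
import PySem

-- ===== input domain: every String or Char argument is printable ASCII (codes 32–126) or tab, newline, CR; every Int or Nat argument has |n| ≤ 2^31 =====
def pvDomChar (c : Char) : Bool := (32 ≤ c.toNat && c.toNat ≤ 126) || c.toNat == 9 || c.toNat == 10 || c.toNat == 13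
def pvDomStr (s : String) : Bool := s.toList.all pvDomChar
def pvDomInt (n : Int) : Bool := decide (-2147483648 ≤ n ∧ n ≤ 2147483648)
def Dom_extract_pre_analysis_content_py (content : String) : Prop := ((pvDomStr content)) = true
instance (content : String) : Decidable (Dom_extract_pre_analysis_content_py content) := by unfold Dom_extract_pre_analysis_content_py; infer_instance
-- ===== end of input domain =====

-- B replaces A's three find passes with min-tracking by one left-to-right scan that
-- tests all three markers at each index (startswith with a tuple); alternative, not faster.

-- ===== PORT A =====
def extract_pre_analysis_content_py (content : String) : String :=
  let markers : List String := ["## Error Analysis", "## Success Analysis", "## Contrast Analysis"]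
  let min_pos : Int :=
    markers.foldl
      (fun min_pos marker =>
        let pos := PySem.Str.find content marker
        if pos ≠ -1 ∧ pos < min_pos then pos else min_pos)
      (PySem.Str.len content)
  if min_pos < (PySem.Str.len content) then
    PySem.Str.strip (PySem.Str.slice content none (some min_pos))
  else content

-- ===== PORT B =====
-- the `for i in range(len(content)): if content.startswith(markers, i)` loop of Source B
def pvScanMarkers (ms : List (List Char)) : List Char → Nat → Option Nat
  | [], _ => none
  | c :: rest, i =>
    if ms.any (fun m => PySem.Chars.startswith (c :: rest) m) then some i
    else pvScanMarkers ms rest (i + 1)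

def extract_pre_analysis_content_py_alt (content : String) : String :=
  let ms : List (List Char) :=
    ["## Error Analysis".toList, "## Success Analysis".toList, "## Contrast Analysis".toList]
  match pvScanMarkers ms content.toList 0 with
  | some i => PySem.Str.strip (PySem.Str.slice content none (some (i : Int)))
  | none => content

-- ===== PRECONDITION & SPEC =====
def Spec_extract_pre_analysis_content_py (content : String) (out : String) : Prop := out = extract_pre_analysis_content_py_alt content
instance (content : String) (out : String) : Decidable (Spec_extract_pre_analysis_content_py content out) := by unfold Spec_extract_pre_analysis_content_py; infer_instance

-- ===== CLAIM (what is proved, stated in full; the proofs are below) =====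
def Claim_equal_extract_pre_analysis_content_py : Prop := ∀ (content : String), Dom_extract_pre_analysis_content_py content → Spec_extract_pre_analysis_content_py content (extract_pre_analysis_content_py content)

-- ===== LEMMAS AND PROOFS =====

-- if the scan returns some k (from start index i), a marker matches at offset k - i and none earlier
theorem pvScan_some {ms : List (List Char)} {t : List Char} {i k : Nat}
    (h : pvScanMarkers ms t i = some k) :
    i ≤ k ∧ ms.any (fun m => PySem.Chars.startswith (t.drop (k - i)) m) = true ∧
      ∀ j < k - i, ms.any (fun m => PySem.Chars.startswith (t.drop j) m) = false := by
  induction t generalizing i with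
  | nil => simp [pvScanMarkers] at h
  | cons c rest ih =>
    rw [pvScanMarkers] at h
    by_cases hc : ms.any (fun m => PySem.Chars.startswith (c :: rest) m) = true
    · simp [hc] at h
      subst h
      refine ⟨le_refl _, by simpa using hc, by omega⟩
    · simp [hc] at h
      obtain ⟨h1, h2, h3⟩ := ih h
      refine ⟨by omega, ?_, ?_⟩
      · have : k - i = (k - (i+1)) + 1 := by omega
        rw [this]; simpa using h2
      · intro j hj
        cases j with
        | zero => simpa using eq_false_of_ne_true hc
        | succ j' =>
          have := h3 j' (by omega)
          simpa using this

-- if the scan returns none, no marker matches at any index of t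
theorem pvScan_none {ms : List (List Char)} {t : List Char} {i : Nat}
    (h : pvScanMarkers ms t i = none) :
    ∀ j < t.length, ms.any (fun m => PySem.Chars.startswith (t.drop j) m) = false := by
  induction t generalizing i with
  | nil => intro j hj; simp at hj
  | cons c rest ih =>
    rw [pvScanMarkers] at h
    by_cases hc : ms.any (fun m => PySem.Chars.startswith (c :: rest) m) = true
    · simp [hc] at h
    · simp [hc] at h
      intro j hj
      cases j with
      | zero => simpa using eq_false_of_ne_true hc
      | succ j' => simpa using ih h j' (by simpa using hj)

-- ===== VERDICT (by name: the statement is the Claim_ definition above) =====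
-- find l m is either -1 with no occurrence anywhere, or a first occurrence with its minimality
theorem pv_find_facts (l m : List Char) :
    (PySem.Chars.find l m = -1 ∧ ∀ j, ¬ m <+: l.drop j) ∨
    (0 ≤ PySem.Chars.find l m ∧ PySem.Chars.find l m ≤ l.length ∧
     m <+: l.drop (PySem.Chars.find l m).toNat ∧
     ∀ i < (PySem.Chars.find l m).toNat, ¬ m <+: l.drop i) := by
  by_cases h : PySem.Chars.find l m = -1
  · left
    refine ⟨h, fun j hj => ?_⟩
    have hin : PySem.Chars.isIn m l = true :=
      (PySem.Chars.exists_prefix_drop_iff_isIn m l).mp ⟨j, hj⟩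
    rw [PySem.Chars.isIn_iff_infix] at hin
    exact (PySem.Chars.find_eq_neg_one_iff l m).mp h hin
  · right
    have h0 : 0 ≤ PySem.Chars.find l m := by
      have := PySem.Chars.neg_one_le_find (s := l) (sub := m); omega
    obtain ⟨hp, hmin⟩ := PySem.Chars.find_spec h0
    exact ⟨h0, PySem.Chars.find_le_length _ _, hp, hmin⟩

-- a nonempty prefix of l.drop j forces j < l.length
theorem pv_prefix_lt {m l : List Char} {j : Nat} (hm : m ≠ []) (h : m <+: l.drop j) :
    j < l.length := by
  have hle := h.length_le
  have : m.length ≠ 0 := fun h0 => hm (List.eq_nil_of_length_eq_zero h0)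
  simp [List.length_drop] at hle
  omega

-- the minimum of the three conditional updates equals the scan's first hit
theorem pv_min3 (L f1 f2 f3 k : Int)
    (h1 : f1 = -1 ∨ (k ≤ f1 ∧ f1 ≤ L)) (h2 : f2 = -1 ∨ (k ≤ f2 ∧ f2 ≤ L))
    (h3 : f3 = -1 ∨ (k ≤ f3 ∧ f3 ≤ L))
    (hsome : f1 = k ∨ f2 = k ∨ f3 = k) (hk0 : 0 ≤ k) (hkL : k < L) :
    (if f3 ≠ -1 ∧ f3 < (if f2 ≠ -1 ∧ f2 < (if f1 ≠ -1 ∧ f1 < L then f1 else L) then f2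
        else (if f1 ≠ -1 ∧ f1 < L then f1 else L))
      then f3
      else (if f2 ≠ -1 ∧ f2 < (if f1 ≠ -1 ∧ f1 < L then f1 else L) then f2
        else (if f1 ≠ -1 ∧ f1 < L then f1 else L))) = k := by
  split_ifs <;> omega

-- ===== VERDICT (by name: the statement is the Claim_ definition above) =====
theorem extract_pre_analysis_content_py_spec : Claim_equal_extract_pre_analysis_content_py := by
  intro content _
  unfold Spec_extract_pre_analysis_content_py
  unfold extract_pre_analysis_content_py extract_pre_analysis_content_py_alt
  simp only [List.foldl]
  set l := content.toList with hl
  set m1 := "## Error Analysis".toList with hm1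
  set m2 := "## Success Analysis".toList with hm2
  set m3 := "## Contrast Analysis".toList with hm3
  have hne1 : m1 ≠ [] := by decide
  have hne2 : m2 ≠ [] := by decide
  have hne3 : m3 ≠ [] := by decide
  cases hscan : pvScanMarkers [m1, m2, m3] l 0 with
  | none =>
    have hno := pvScan_none (i := 0) hscan
    have hnone : ∀ m, m ∈ [m1, m2, m3] → m ≠ [] → PySem.Chars.find l m = -1 := by
      intro m hmem hmne
      rcases pv_find_facts l m with ⟨he, _⟩ | ⟨h0, _, hp, _⟩
      · exact he
      · exfalso
        have hj : (PySem.Chars.find l m).toNat < l.length := pv_prefix_lt hmne hp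
        have hall := hno _ hj
        rw [List.any_eq_false] at hall
        have hfalse := hall m hmem
        have hsw' := (PySem.Chars.startswith_iff _ _).mpr hp
        simp [hfalse] at hsw'
    have e1 := hnone m1 (by simp) hne1
    have e2 := hnone m2 (by simp) hne2
    have e3 := hnone m3 (by simp) hne3
    simp [e1, e2, e3, PySem.Str.find_eq, PySem.Str.len_eq, ← hl, ← hm1, ← hm2, ← hm3]
  | some k =>
    obtain ⟨-, hany, hmin⟩ := pvScan_some hscan
    simp only [Nat.sub_zero] at hany hmin
    rw [List.any_eq_true] at hany
    obtain ⟨m, hmem, hsw⟩ := hany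
    rw [PySem.Chars.startswith_iff _ _] at hsw
    have hmne : m ≠ [] := by
      rcases (by simpa using hmem : m = m1 ∨ m = m2 ∨ m = m3) with h|h|h <;> simp [h, hne1, hne2, hne3]
    have hkL : k < l.length := pv_prefix_lt hmne hsw
    -- every successful find is ≥ k
    have hge : ∀ m', m' ∈ [m1, m2, m3] →
        PySem.Chars.find l m' = -1 ∨ (↑k ≤ PySem.Chars.find l m' ∧ PySem.Chars.find l m' ≤ ↑l.length) := by
      intro m' hmem'
      rcases pv_find_facts l m' with ⟨he, _⟩ | ⟨h0, hlen, hp, _⟩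
      · exact Or.inl he
      · right
        refine ⟨?_, hlen⟩
        by_contra hlt
        push Not at hlt
        have hlt' : (PySem.Chars.find l m').toNat < k := by omega
        have hall := hmin _ hlt'
        rw [List.any_eq_false] at hall
        have hfalse := hall m' hmem'
        have hsw' := (PySem.Chars.startswith_iff _ _).mpr hp
        simp [hfalse] at hsw'
    -- and the matched marker's find equals k
    have heq : PySem.Chars.find l m = (k : Int) := by
      rcases pv_find_facts l m with ⟨_, hno⟩ | ⟨h0, _, _, hminm⟩
      · exact absurd hsw (hno k)
      · have hle : (PySem.Chars.find l m).toNat ≤ k := by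
          by_contra hgt
          exact absurd hsw (hminm k (by omega))
        rcases hge m hmem with he | ⟨hge', _⟩
        · omega
        · omega
    have hk0 : (0:Int) ≤ (k:Int) := by positivity
    have hsome : PySem.Chars.find l m1 = (k:Int) ∨ PySem.Chars.find l m2 = (k:Int) ∨ PySem.Chars.find l m3 = (k:Int) := by
      rcases (by simpa using hmem : m = m1 ∨ m = m2 ∨ m = m3) with h|h|h
      · exact Or.inl (h ▸ heq)
      · exact Or.inr (Or.inl (h ▸ heq))
      · exact Or.inr (Or.inr (h ▸ heq))
    have hmp := pv_min3 (l.length : Int) (PySem.Chars.find l m1) (PySem.Chars.find l m2)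
      (PySem.Chars.find l m3) (k : Int)
      (hge m1 (by simp)) (hge m2 (by simp)) (hge m3 (by simp)) hsome hk0 (by exact_mod_cast hkL)
    simp only [PySem.Str.find_eq, PySem.Str.len_eq, ← hl, ← hm1, ← hm2, ← hm3]
    rw [hmp]
    rw [if_pos (by exact_mod_cast hkL)]
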